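-- pv_equiv track=rewrite | github.com/gardenlinux/gardenlinux | tests/util/coverage.py | detect_duplicate_setting_ids
-- ===== SOURCE A (Python) =====
-- from collections import Counter
-- from typing import Any, Dict, List, Optional, Set, Tuple
--
-- def detect_duplicate_setting_ids(
--     setting_ids_by_feature: Dict[str, List[str]],
-- ) -> Tuple[Dict[str, List[str]], Dict[str, List[str]]]:
--     """
--     Detect duplicate setting IDs within features and across features using Counter for efficiency.
--
--     Args:
--         setting_ids_by_feature: Dict mapping feature names to their setting IDs (may contain duplicates)
--
--     Returns:
--         Tuple of (within_feature_duplicates, across_features_duplicates) where: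
--         - within_feature_duplicates: Dict mapping feature names to list of duplicate IDs within that feature
--         - across_features_duplicates: Dict mapping setting IDs to list of features where they appear
--     """
--     within_feature_duplicates = {}
--     setting_id_to_features: Dict[str, List[str]] = {}
--
--     # Check for duplicates within each feature using Counter
--     for feature, setting_ids in setting_ids_by_feature.items():
--         counter = Counter(setting_ids)
--         duplicates = [sid for sid, count in counter.items() if count > 1]
--         if duplicates:
--             within_feature_duplicates[feature] = sorted(duplicates)
--
--         # Track unique setting IDs for cross-feature duplicate detection
--         for sid in counter.keys():
--             if sid not in setting_id_to_features:
--                 setting_id_to_features[sid] = []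
--             setting_id_to_features[sid].append(feature)
--
--     # Check for duplicates across features
--     across_features_duplicates = {
--         sid: sorted(features)
--         for sid, features in setting_id_to_features.items()
--         if len(features) > 1
--     }
--
--     return within_feature_duplicates, across_features_duplicates
-- ===== SOURCE B (Python) =====
-- def detect_duplicate_setting_ids(setting_ids_by_feature):
--     # One pass building a sid-centric index: sid -> {feature: occurrence count};
--     # both result dicts are then derived from that single table.
--     index = {}
--     for feature, setting_ids in setting_ids_by_feature.items():
--         for sid in setting_ids:
--             fc = index.setdefault(sid, {})
--             fc[feature] = fc.get(feature, 0) + 1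
--
--     across_features_duplicates = {
--         sid: sorted(fc) for sid, fc in index.items() if len(fc) > 1
--     }
--
--     dups_by_feature = {}
--     for sid, fc in index.items():
--         for feature, count in fc.items():
--             if count > 1:
--                 dups_by_feature.setdefault(feature, []).append(sid)
--
--     within_feature_duplicates = {}
--     for feature in setting_ids_by_feature:
--         dups = sorted(dups_by_feature.get(feature, []))
--         if dups:
--             within_feature_duplicates[feature] = dups
--
--     return within_feature_duplicates, across_features_duplicates
-- ===== Notes on version B (the rewrite author's own statement) =====
-- stated objective: alternative
-- what changed: Replaces A's feature-centric pass (a Counter per feature plus an incrementally grown sid->features list) with a single sid-centric index {sid: {feature: count}} built in one nested pass, from which both result dicts are then derived by two shape-different scans.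
import Mathlib
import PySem

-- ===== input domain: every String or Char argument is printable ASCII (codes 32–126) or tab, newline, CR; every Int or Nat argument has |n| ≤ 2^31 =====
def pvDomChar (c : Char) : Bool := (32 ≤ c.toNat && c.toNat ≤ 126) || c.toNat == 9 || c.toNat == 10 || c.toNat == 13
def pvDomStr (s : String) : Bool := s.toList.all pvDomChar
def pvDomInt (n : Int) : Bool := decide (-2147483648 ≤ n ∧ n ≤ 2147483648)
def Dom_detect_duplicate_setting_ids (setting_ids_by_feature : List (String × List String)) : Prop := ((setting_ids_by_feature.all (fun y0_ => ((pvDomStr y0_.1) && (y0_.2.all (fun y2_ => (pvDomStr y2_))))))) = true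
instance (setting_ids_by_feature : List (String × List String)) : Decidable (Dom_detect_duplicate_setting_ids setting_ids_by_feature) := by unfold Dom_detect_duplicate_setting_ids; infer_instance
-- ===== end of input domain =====

-- B replaces A's feature-centric Counter pass + incremental feature list with one sid-centric
-- index {sid: {feature: count}} from which both result dicts are derived (objective: alternative).

-- ===== PORT A =====
-- duplicates = [sid for sid, count in counter.items() if count > 1]
def pvA_dups (sids : List String) : List String :=
  (((PySem.Dict.counter sids).items).filter (fun q => decide ((1 : Int) < q.2))).map (fun q => q.1)

-- the body of A's loop acting on within_feature_duplicates
def pvA_withinStep (w : List (String × List String)) (p : String × List String) : List (String × List String) :=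
  if (pvA_dups p.2).isEmpty then w else w ++ [(p.1, PySem.List.sorted (pvA_dups p.2) (fun x => x) false)]

-- the body of A's loop acting on setting_id_to_features ('if sid not in d: d[sid] = []; d[sid].append(feature)')
def pvA_stfStep (d : PySem.Dict String (List String)) (p : String × List String) : PySem.Dict String (List String) :=
  (PySem.Dict.counter p.2).keys.foldl
    (fun d sid => (if d.contains sid then d else d.insert sid []).modify sid [] (fun fs => fs ++ [p.1])) d

def detect_duplicate_setting_ids (setting_ids_by_feature : List (String × List String)) : (List (String × List String)) × (List (String × List String)) :=
  let st := setting_ids_by_feature.foldl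
    (fun st p => (pvA_withinStep st.1 p, pvA_stfStep st.2 p)) ([], PySem.Dict.empty)
  (st.1,
   ((st.2.items.filter (fun q => decide (1 < q.2.length))).map
      (fun q => (q.1, PySem.List.sorted q.2 (fun x => x) false))))

-- ===== PORT B =====
-- fc = index.setdefault(sid, {}); fc[feature] = fc.get(feature, 0) + 1
def pvB_idxStep (f : String) (idx : PySem.Dict String (PySem.Dict String Int)) (sid : String) : PySem.Dict String (PySem.Dict String Int) :=
  idx.modify sid PySem.Dict.empty (fun fc => fc.insert f (fc.getD f 0 + 1))

def detect_duplicate_setting_ids_alt (setting_ids_by_feature : List (String × List String)) : (List (String × List String)) × (List (String × List String)) :=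
  let index := setting_ids_by_feature.foldl
    (fun idx p => p.2.foldl (pvB_idxStep p.1) idx) PySem.Dict.empty
  let across := ((index.items.filter (fun q => decide (1 < q.2.size))).map
      (fun q => (q.1, PySem.List.sorted q.2.keys (fun x => x) false)))
  -- dups_by_feature.setdefault(feature, []).append(sid), guarded by count > 1
  let dups_by_feature := index.items.foldl
    (fun w q => q.2.items.foldl
      (fun w r => if decide ((1 : Int) < r.2) then w.modify r.1 [] (fun s => s ++ [q.1]) else w) w)
    PySem.Dict.empty
  let within := setting_ids_by_feature.foldl
    (fun w p =>
      let dups := PySem.List.sorted (dups_by_feature.getD p.1 []) (fun x => x) false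
      if dups.isEmpty then w else w ++ [(p.1, dups)]) []
  (within, across)

-- ===== PRECONDITION & SPEC =====
-- Pre_ : the argument models a Python dict, whose keys (feature names) are necessarily distinct;
-- an association list with a repeated feature name has no Python-dict counterpart, so nothing is claimed there.
def Pre_detect_duplicate_setting_ids (setting_ids_by_feature : List (String × List String)) : Prop :=
  (setting_ids_by_feature.map (fun p => p.1)).Nodup
instance (setting_ids_by_feature : List (String × List String)) : Decidable (Pre_detect_duplicate_setting_ids setting_ids_by_feature) := by unfold Pre_detect_duplicate_setting_ids; infer_instance

def pvWitness_detect_duplicate_setting_ids : (List (String × List String)) :=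
  [("f", ["a", "a", "b"]), ("g", ["a"])]

def Spec_detect_duplicate_setting_ids (setting_ids_by_feature : List (String × List String)) (out : (List (String × List String)) × (List (String × List String))) : Prop := out = detect_duplicate_setting_ids_alt setting_ids_by_feature
instance (setting_ids_by_feature : List (String × List String)) (out : (List (String × List String)) × (List (String × List String))) : Decidable (Spec_detect_duplicate_setting_ids setting_ids_by_feature out) := by unfold Spec_detect_duplicate_setting_ids; infer_instance

-- ===== CLAIM (what is proved, stated in full; the proofs are below) =====
def Claim_equal_detect_duplicate_setting_ids : Prop := ∀ (setting_ids_by_feature : List (String × List String)), Dom_detect_duplicate_setting_ids setting_ids_by_feature → Pre_detect_duplicate_setting_ids setting_ids_by_feature → Spec_detect_duplicate_setting_ids setting_ids_by_feature (detect_duplicate_setting_ids setting_ids_by_feature)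


-- ===== LEMMAS AND PROOFS =====

-- the features (in order) whose id list contains sid
def pvFeatsOf (L : List (String × List String)) (sid : String) : List String :=
  (L.filter (fun p => p.2.contains sid)).map (fun p => p.1)

-- the global key order both result dicts share: first appearance of each sid
def pvGKeys (L : List (String × List String)) : List String :=
  L.foldl (fun s p => PySem.Set.update s p.2) []

-- -- Set facts --
theorem pv_add_of_mem {a : String} {s : PySem.Set String} (h : a ∈ s) : PySem.Set.add s a = s := by
  simp [PySem.Set.add, h]

theorem pv_add_of_not_mem {a : String} {s : PySem.Set String} (h : ¬ a ∈ s) : PySem.Set.add s a = s ++ [a] := by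
  simp [PySem.Set.add, h]

theorem pv_update_add (s acc : PySem.Set String) (x : String) :
    PySem.Set.update s (acc.add x) = (PySem.Set.update s acc).add x := by
  by_cases h : x ∈ acc
  · rw [pv_add_of_mem h, pv_add_of_mem ((PySem.Set.mem_update s acc x).2 (Or.inr h))]
  · rw [pv_add_of_not_mem h, PySem.Set.update, List.foldl_append]
    rfl

theorem pv_upd_upd (xs : List String) (acc s : PySem.Set String) :
    PySem.Set.update s (PySem.Set.update acc xs) = PySem.Set.update (PySem.Set.update s acc) xs := by
  induction xs generalizing acc with
  | nil => rfl
  | cons x xs ih =>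
    show PySem.Set.update s (PySem.Set.update (acc.add x) xs)
        = PySem.Set.update ((PySem.Set.update s acc).add x) xs
    rw [ih, pv_update_add]

theorem pv_update_ofList (s : PySem.Set String) (xs : List String) :
    PySem.Set.update s (PySem.Set.ofList xs) = PySem.Set.update s xs := by
  have := pv_upd_upd xs [] s
  simpa [PySem.Set.ofList, PySem.Set.update, PySem.Set.empty] using this

theorem pv_update_disjoint (xs : List String) (s : PySem.Set String)
    (h : ∀ x ∈ xs, x ∉ s) (hx : xs.Nodup) : PySem.Set.update s xs = s ++ xs := by
  induction xs generalizing s with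
  | nil => simp [PySem.Set.update]
  | cons x xs ih =>
    show PySem.Set.update (s.add x) xs = _
    rw [pv_add_of_not_mem (h x (by simp)), ih]
    · simp
    · intro y hy
      simp only [List.mem_append, List.mem_singleton]
      rintro (hys | rfl)
      · exact h y (by simp [hy]) hys
      · exact (List.nodup_cons.1 hx).1 hy
    · exact (List.nodup_cons.1 hx).2

theorem pv_ofList_nodup (xs : List String) (h : xs.Nodup) : PySem.Set.ofList xs = xs := by
  have := pv_update_disjoint xs [] (by simp) h
  simpa [PySem.Set.ofList, PySem.Set.update, PySem.Set.empty] using this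

theorem pv_mem_gkeys_aux (L : List (String × List String)) (s : PySem.Set String) (a : String) :
    a ∈ L.foldl (fun s p => PySem.Set.update s p.2) s ↔ a ∈ s ∨ ∃ p ∈ L, a ∈ p.2 := by
  induction L generalizing s with
  | nil => simp
  | cons p L ih =>
    simp only [List.foldl_cons, ih, PySem.Set.mem_update, List.mem_cons]
    constructor
    · rintro ((h | h) | ⟨q, hq, ha⟩)
      · exact Or.inl h
      · exact Or.inr ⟨p, Or.inl rfl, h⟩
      · exact Or.inr ⟨q, Or.inr hq, ha⟩
    · rintro (h | ⟨q, (rfl | hq), ha⟩)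
      · exact Or.inl (Or.inl h)
      · exact Or.inl (Or.inr ha)
      · exact Or.inr ⟨q, hq, ha⟩

theorem pv_nodup_gkeys_aux (L : List (String × List String)) (s : PySem.Set String) (h : s.Nodup) :
    (L.foldl (fun s p => PySem.Set.update s p.2) s).Nodup := by
  induction L generalizing s with
  | nil => exact h
  | cons p L ih => exact ih _ (PySem.Set.nodup_update s p.2 h)

-- -- A's setting_id_to_features loop --
theorem pv_stepA_keys (f : String) (d : PySem.Dict String (List String)) (sid : String) :
    ((if d.contains sid then d else d.insert sid []).modify sid [] (fun fs => fs ++ [f])).keys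
      = PySem.Set.add d.keys sid := by
  by_cases h : d.contains sid = true
  · rw [if_pos h, PySem.Dict.keys_modify, PySem.Dict.keys_insert_of_contains _ _ h,
      pv_add_of_mem ((PySem.Dict.contains_iff_mem_keys d sid).1 h)]
  · have h' : d.contains sid = false := by simpa using h
    rw [if_neg (by simp [h']), PySem.Dict.keys_modify,
      PySem.Dict.keys_insert_of_contains _ _ (by simp),
      PySem.Dict.keys_insert_of_not_contains _ _ h',
      pv_add_of_not_mem (fun hm => by simp [(PySem.Dict.contains_iff_mem_keys d sid).2 hm] at h')]

theorem pv_stepA_getD (f : String) (d : PySem.Dict String (List String)) (sid t : String) :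
    ((if d.contains sid then d else d.insert sid []).modify sid [] (fun fs => fs ++ [f])).getD t []
      = if t = sid then d.getD sid [] ++ [f] else d.getD t [] := by
  by_cases h : d.contains sid = true
  · rw [if_pos h, PySem.Dict.getD_modify]
  · have h' : d.contains sid = false := by simpa using h
    rw [if_neg (by simp [h']), PySem.Dict.getD_modify]
    by_cases ht : t = sid
    · simp [ht, PySem.Dict.getD_insert_self, PySem.Dict.getD_of_not_contains _ _ h']
    · simp [ht, PySem.Dict.getD_insert_of_ne _ _ _ ht]

theorem pv_innerA_keys (f : String) (ks : List String) (d : PySem.Dict String (List String)) :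
    (ks.foldl (fun d sid => (if d.contains sid then d else d.insert sid []).modify sid [] (fun fs => fs ++ [f])) d).keys
      = PySem.Set.update d.keys ks := by
  induction ks generalizing d with
  | nil => rfl
  | cons k ks ih =>
    simp only [List.foldl_cons]
    rw [ih, pv_stepA_keys]
    rfl

theorem pv_innerA_getD (f : String) (ks : List String) (d : PySem.Dict String (List String)) (t : String) :
    (ks.foldl (fun d sid => (if d.contains sid then d else d.insert sid []).modify sid [] (fun fs => fs ++ [f])) d).getD t []
      = d.getD t [] ++ List.replicate (ks.count t) f := by
  induction ks generalizing d with
  | nil => simp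
  | cons k ks ih =>
    simp only [List.foldl_cons]
    rw [ih, pv_stepA_getD]
    by_cases ht : t = k
    · subst ht
      simp [List.replicate_succ]
    · have hkt : k ≠ t := fun h => ht h.symm
      simp [ht, hkt]

theorem pv_stfA_keys (L : List (String × List String)) (d : PySem.Dict String (List String)) :
    (L.foldl pvA_stfStep d).keys = L.foldl (fun s p => PySem.Set.update s p.2) d.keys := by
  induction L generalizing d with
  | nil => rfl
  | cons p L ih =>
    simp only [List.foldl_cons]
    rw [ih, pvA_stfStep, PySem.Dict.keys_counter, pv_innerA_keys, pv_update_ofList]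

theorem pv_stfA_getD (L : List (String × List String)) (d : PySem.Dict String (List String)) (t : String) :
    (L.foldl pvA_stfStep d).getD t [] = d.getD t [] ++ pvFeatsOf L t := by
  induction L generalizing d with
  | nil => simp [pvFeatsOf]
  | cons p L ih =>
    simp only [List.foldl_cons]
    rw [ih, pvA_stfStep, PySem.Dict.keys_counter, pv_innerA_getD]
    have hcnt : (PySem.Set.ofList p.2).count t = if t ∈ p.2 then 1 else 0 := by
      by_cases h : t ∈ p.2
      · simp [h]
      · simp [h, List.count_eq_zero.2 (fun hm => h ((PySem.Set.mem_ofList p.2 t).1 hm))]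
    rw [hcnt]
    simp only [pvFeatsOf, List.filter_cons]
    by_cases h : t ∈ p.2
    · simp [h]
    · simp [h]

-- -- B's index loop --
theorem pv_keys_insert_add (fc : PySem.Dict String Int) (f : String) (v : Int) :
    (fc.insert f v).keys = PySem.Set.add fc.keys f := by
  by_cases h : fc.contains f = true
  · rw [PySem.Dict.keys_insert_of_contains _ _ h, pv_add_of_mem ((PySem.Dict.contains_iff_mem_keys fc f).1 h)]
  · have h' : fc.contains f = false := by simpa using h
    rw [PySem.Dict.keys_insert_of_not_contains _ _ h',
      pv_add_of_not_mem (fun hm => by simp [(PySem.Dict.contains_iff_mem_keys fc f).2 hm] at h')]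

theorem pv_idxB_keys (L : List (String × List String)) (idx : PySem.Dict String (PySem.Dict String Int)) :
    (L.foldl (fun idx p => p.2.foldl (pvB_idxStep p.1) idx) idx).keys
      = L.foldl (fun s p => PySem.Set.update s p.2) idx.keys := by
  induction L generalizing idx with
  | nil => rfl
  | cons p L ih =>
    simp only [List.foldl_cons]
    rw [ih]
    congr 1
    exact PySem.Dict.keys_foldl_modify p.2 PySem.Dict.empty (fun _ _ fc => fc.insert p.1 (fc.getD p.1 0 + 1)) idx

theorem pv_innerB_val_keys (f : String) (sids : List String) (idx : PySem.Dict String (PySem.Dict String Int)) (sid : String) :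
    ((sids.foldl (pvB_idxStep f) idx).getD sid PySem.Dict.empty).keys
      = if sid ∈ sids then PySem.Set.add ((idx.getD sid PySem.Dict.empty).keys) f
        else (idx.getD sid PySem.Dict.empty).keys := by
  induction sids generalizing idx with
  | nil => simp
  | cons x sids ih =>
    simp only [List.foldl_cons]
    rw [ih]
    have hstep : (pvB_idxStep f idx x).getD sid PySem.Dict.empty
        = if sid = x then (idx.getD sid PySem.Dict.empty).insert f ((idx.getD sid PySem.Dict.empty).getD f 0 + 1)
          else idx.getD sid PySem.Dict.empty := by
      rw [pvB_idxStep, PySem.Dict.getD_modify]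
      by_cases h : sid = x <;> simp [h]
    by_cases hx : sid = x
    · subst hx
      simp only [hstep, List.mem_cons, true_or, if_pos]
      by_cases hmem : sid ∈ sids
      · rw [if_pos hmem, pv_keys_insert_add]
        rw [pv_add_of_mem]
        simp [PySem.Set.mem_add]
      · rw [if_neg hmem, pv_keys_insert_add]
    · rw [hstep, if_neg hx]
      by_cases hmem : sid ∈ sids
      · simp [hmem, hx]
      · simp [hmem, hx]

theorem pv_idxB_val_keys (L : List (String × List String)) (idx : PySem.Dict String (PySem.Dict String Int)) (sid : String) :
    ((L.foldl (fun idx p => p.2.foldl (pvB_idxStep p.1) idx) idx).getD sid PySem.Dict.empty).keys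
      = PySem.Set.update ((idx.getD sid PySem.Dict.empty).keys) (pvFeatsOf L sid) := by
  induction L generalizing idx with
  | nil => rfl
  | cons p L ih =>
    simp only [List.foldl_cons]
    rw [ih]
    rw [pv_innerB_val_keys]
    simp only [pvFeatsOf, List.filter_cons]
    by_cases h : sid ∈ p.2
    · have hc : p.2.contains sid = true := by simpa [List.elem_eq_contains] using h
      simp only [if_pos h, hc, if_pos, List.map_cons]
      rfl
    · have hc : p.2.contains sid = false := by simpa [List.elem_eq_contains] using h
      simp only [if_neg h, hc]
      simp

theorem pv_innerB_val_getD (f : String) (sids : List String) (idx : PySem.Dict String (PySem.Dict String Int)) (sid g : String) :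
    ((sids.foldl (pvB_idxStep f) idx).getD sid PySem.Dict.empty).getD g 0
      = (idx.getD sid PySem.Dict.empty).getD g 0 + (if g = f then (sids.count sid : Int) else 0) := by
  induction sids generalizing idx with
  | nil => simp
  | cons x sids ih =>
    simp only [List.foldl_cons]
    rw [ih]
    have hstep : (pvB_idxStep f idx x).getD sid PySem.Dict.empty
        = if sid = x then (idx.getD sid PySem.Dict.empty).insert f ((idx.getD sid PySem.Dict.empty).getD f 0 + 1)
          else idx.getD sid PySem.Dict.empty := by
      rw [pvB_idxStep, PySem.Dict.getD_modify]
      by_cases h : sid = x <;> simp [h]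
    rw [hstep]
    by_cases hx : sid = x
    · rw [if_pos hx, PySem.Dict.getD_insert]
      by_cases hg : g = f
      · subst hx; simp [hg]; ring
      · simp [hg]
    · rw [if_neg hx]
      by_cases hg : g = f
      · have hxs : x ≠ sid := fun h => hx h.symm
        simp [hg, hxs]
      · simp [hg]

theorem pv_idxB_val_getD (L : List (String × List String)) (idx : PySem.Dict String (PySem.Dict String Int)) (sid g : String) :
    ((L.foldl (fun idx p => p.2.foldl (pvB_idxStep p.1) idx) idx).getD sid PySem.Dict.empty).getD g 0
      = (idx.getD sid PySem.Dict.empty).getD g 0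
        + (((L.filter (fun p => p.1 == g)).flatMap (fun p => p.2)).count sid : Int) := by
  induction L generalizing idx with
  | nil => simp
  | cons p L ih =>
    simp only [List.foldl_cons]
    rw [ih, pv_innerB_val_getD]
    rw [List.filter_cons]
    by_cases h : p.1 = g
    · simp [h, List.count_append]
      ring
    · have hgp : ¬ g = p.1 := fun hh => h hh.symm
      simp [h, hgp]

-- -- B's dups_by_feature loop --
theorem pv_dbf_inner (l : List (String × Int)) (w : PySem.Dict String (List String)) (sid g : String) :
    (l.foldl (fun w r => if decide ((1 : Int) < r.2) then w.modify r.1 [] (fun s => s ++ [sid]) else w) w).getD g []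
      = w.getD g [] ++ (l.filter (fun r => r.1 == g && decide ((1 : Int) < r.2))).map (fun _ => sid) := by
  induction l generalizing w with
  | nil => simp
  | cons r l ih =>
    simp only [List.foldl_cons, List.filter_cons]
    by_cases hc : (1 : Int) < r.2
    · rw [if_pos (by simpa using hc), ih, PySem.Dict.getD_modify]
      by_cases hg : r.1 = g
      · subst hg
        simp [hc]
      · have hgr : ¬ g = r.1 := fun h => hg h.symm
        simp [hgr, hg, hc]
    · rw [if_neg (by simpa using hc), ih]
      simp [hc]

theorem pv_dbf_outer (items : List (String × PySem.Dict String Int)) (w : PySem.Dict String (List String)) (g : String) :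
    (items.foldl (fun w q => q.2.items.foldl
        (fun w r => if decide ((1 : Int) < r.2) then w.modify r.1 [] (fun s => s ++ [q.1]) else w) w) w).getD g []
      = w.getD g [] ++ items.flatMap
          (fun q => (q.2.items.filter (fun r => r.1 == g && decide ((1 : Int) < r.2))).map (fun _ => q.1)) := by
  induction items generalizing w with
  | nil => simp
  | cons q items ih =>
    simp only [List.foldl_cons, List.flatMap_cons]
    rw [ih, pv_dbf_inner]
    simp

theorem pv_flatMap_if_filter (xs : List String) (P : String → Bool) :
    xs.flatMap (fun k => if P k then [k] else []) = xs.filter P := by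
  induction xs with
  | nil => rfl
  | cons x xs ih =>
    simp only [List.flatMap_cons, List.filter_cons, ih]
    by_cases h : P x <;> simp [h]

theorem pv_filter_eq_nodup (xs : List String) (hx : xs.Nodup) (g : String) (P : String → Bool) :
    xs.filter (fun f => f == g && P f) = if g ∈ xs ∧ P g = true then [g] else [] := by
  induction xs with
  | nil => simp
  | cons x xs ih =>
    simp only [List.filter_cons, List.nodup_cons] at *
    by_cases hxg : x = g
    · subst hxg
      by_cases hp : P x = true
      · rw [if_pos (by simp [hp]), ih hx.2, if_neg (fun h => hx.1 h.1)]
        simp [hp]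
      · rw [if_neg (by simp [hp]), ih hx.2, if_neg (fun h => hx.1 h.1),
          if_neg (fun h => hp (by rcases h with ⟨_, h2⟩; exact h2))]
    · rw [if_neg (by simp [hxg]), ih hx.2]
      by_cases hm : g ∈ xs ∧ P g = true
      · rw [if_pos hm, if_pos ⟨by simp [hm.1], hm.2⟩]
      · rw [if_neg hm, if_neg]
        rintro ⟨h1, h2⟩
        rw [List.mem_cons] at h1
        rcases h1 with rfl | h1
        · exact hxg rfl
        · exact hm ⟨h1, h2⟩

-- -- misc --
theorem pv_filter_fst_eq (L : List (String × List String)) (p : String × List String)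
    (hnd : (L.map (fun p => p.1)).Nodup) (hp : p ∈ L) :
    L.filter (fun q => q.1 == p.1) = [p] := by
  induction L with
  | nil => simp at hp
  | cons q L ih =>
    simp only [List.map_cons, List.nodup_cons] at hnd
    rcases List.mem_cons.1 hp with rfl | hpl
    · rw [List.filter_cons, if_pos (by simp)]
      have hnil : L.filter (fun r => r.1 == p.1) = [] := by
        apply List.filter_eq_nil_iff.2
        intro r hr
        simp only [beq_iff_eq]
        intro hre
        exact hnd.1 (hre ▸ List.mem_map_of_mem hr)
      rw [hnil]
    · rw [List.filter_cons, if_neg, ih hnd.2 hpl]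
      simp only [beq_iff_eq]
      intro hqe
      exact hnd.1 (hqe ▸ List.mem_map_of_mem hpl)

theorem pv_featsOf_nodup (L : List (String × List String)) (sid : String)
    (hnd : (L.map (fun p => p.1)).Nodup) : (pvFeatsOf L sid).Nodup := by
  have hsub : (pvFeatsOf L sid).Sublist (L.map (fun p => p.1)) := by
    unfold pvFeatsOf
    exact List.Sublist.map _ List.filter_sublist
  exact List.Nodup.sublist hsub hnd

theorem pv_sorted_eq_of_nodup_mem (xs ys : List String) (hx : xs.Nodup) (hy : ys.Nodup)
    (h : ∀ a, a ∈ xs ↔ a ∈ ys) :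
    PySem.List.sorted xs (fun x => x) false = PySem.List.sorted ys (fun x => x) false := by
  have hperm : xs.Perm ys := (List.perm_ext_iff_of_nodup hx hy).2 h
  have hzy : (PySem.List.sorted ys (fun x => x) false).Perm ys := PySem.List.sorted_perm ys _ false
  have hz_nodup : (PySem.List.sorted ys (fun x => x) false).Nodup := hzy.nodup_iff.2 hy
  have hle : (PySem.List.sorted ys (fun x => x) false).Pairwise (fun a b => a ≤ b) :=
    PySem.List.sorted_pairwise ys (fun x => x)
  have hlt : (PySem.List.sorted ys (fun x => x) false).Pairwise (fun a b => a < b) :=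
    (hle.and hz_nodup).imp (fun hab => lt_of_le_of_ne hab.1 hab.2)
  exact PySem.List.sorted_eq_of_perm_of_pairwise_lt xs _ (fun x => x) (hzy.trans hperm.symm) hlt

-- ===== VERDICT (by name: the statement is the Claim_ definition above) =====
theorem detect_duplicate_setting_ids_spec : Claim_equal_detect_duplicate_setting_ids := by
  intro L _hdom hPre
  unfold Spec_detect_duplicate_setting_ids
  unfold detect_duplicate_setting_ids detect_duplicate_setting_ids_alt
  rw [PySem.List.foldl_prod_mk]
  set stf := L.foldl pvA_stfStep PySem.Dict.empty with hstf
  set idx := L.foldl (fun idx p => p.2.foldl (pvB_idxStep p.1) idx) PySem.Dict.empty with hidx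
  have hPre' : (L.map (fun p => p.1)).Nodup := hPre
  -- shared facts
  have h1 : stf.keys = pvGKeys L := by
    rw [hstf, pv_stfA_keys, PySem.Dict.keys_empty]; rfl
  have h2 : idx.keys = pvGKeys L := by
    rw [hidx, pv_idxB_keys, PySem.Dict.keys_empty]; rfl
  have hnodup : (pvGKeys L).Nodup := pv_nodup_gkeys_aux L [] List.nodup_nil
  have hmemgk : ∀ a, a ∈ pvGKeys L ↔ ∃ p ∈ L, a ∈ p.2 := by
    intro a
    rw [pvGKeys, pv_mem_gkeys_aux]
    simp
  have hstf_val : ∀ t, stf.getD t [] = pvFeatsOf L t := by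
    intro t
    rw [hstf, pv_stfA_getD, PySem.Dict.getD_empty]
    rfl
  have hval_keys : ∀ t, (idx.getD t PySem.Dict.empty).keys = pvFeatsOf L t := by
    intro t
    rw [hidx, pv_idxB_val_keys, PySem.Dict.getD_empty, PySem.Dict.keys_empty]
    show PySem.Set.ofList (pvFeatsOf L t) = _
    exact pv_ofList_nodup _ (pv_featsOf_nodup L t hPre')
  have hval_cnt : ∀ t, ∀ p ∈ L, (idx.getD t PySem.Dict.empty).getD p.1 0 = (p.2.count t : Int) := by
    intro t p hp
    rw [hidx, pv_idxB_val_getD, pv_filter_fst_eq L p hPre' hp]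
    simp
  have hitemsA : stf.items = (pvGKeys L).map (fun k => (k, pvFeatsOf L k)) := by
    rw [PySem.Dict.items_eq_map_keys stf (h1 ▸ hnodup) [], h1]
    exact List.map_congr_left (fun k _ => by rw [hstf_val])
  have hitemsB : idx.items = (pvGKeys L).map (fun k => (k, idx.getD k PySem.Dict.empty)) := by
    rw [PySem.Dict.items_eq_map_keys idx (h2 ▸ hnodup) PySem.Dict.empty, h2]
  -- across_features_duplicates agree
  have hacross :
      ((stf.items.filter (fun q => decide (1 < q.2.length))).map
        (fun q => (q.1, PySem.List.sorted q.2 (fun x => x) false)))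
      = ((idx.items.filter (fun q => decide (1 < q.2.size))).map
        (fun q => (q.1, PySem.List.sorted q.2.keys (fun x => x) false))) := by
    rw [hitemsA, hitemsB, List.filter_map, List.filter_map, List.map_map, List.map_map]
    have hsz : ∀ k, (idx.getD k PySem.Dict.empty).size = (pvFeatsOf L k).length := by
      intro k
      rw [← hval_keys k]
      simp [PySem.Dict.size, PySem.Dict.keys]
    have hfil : List.filter ((fun q => decide (1 < q.2.length)) ∘ (fun k => (k, pvFeatsOf L k))) (pvGKeys L)
        = List.filter ((fun q => decide (1 < q.2.size)) ∘ (fun k => (k, idx.getD k PySem.Dict.empty))) (pvGKeys L) := by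
      apply List.filter_congr
      intro k _
      simp [hsz k]
    rw [hfil]
    apply List.map_congr_left
    intro k _
    simp [hval_keys k]
  -- within_feature_duplicates agree
  set dbf := idx.items.foldl
    (fun w q => q.2.items.foldl
      (fun w r => if decide ((1 : Int) < r.2) then w.modify r.1 [] (fun s => s ++ [q.1]) else w) w)
    PySem.Dict.empty with hdbfdef
  have hmemfeats : ∀ k g, (0 : Int) < (idx.getD k PySem.Dict.empty).getD g 0 → g ∈ pvFeatsOf L k := by
    intro k g hpos
    rw [hidx, pv_idxB_val_getD] at hpos
    simp only [PySem.Dict.getD_empty] at hpos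
    rw [zero_add] at hpos
    have hcnt : 0 < ((L.filter (fun p => p.1 == g)).flatMap (fun p => p.2)).count k := by
      exact_mod_cast hpos
    obtain ⟨q, hq, hk⟩ := List.mem_flatMap.1 (List.count_pos_iff.1 hcnt)
    have hqL := List.mem_of_mem_filter hq
    have hqg : q.1 = g := by simpa using List.of_mem_filter hq
    exact hqg ▸ List.mem_map_of_mem (List.mem_filter.2 ⟨hqL, by simpa [List.elem_eq_contains] using hk⟩)
  have hdbf : ∀ g, dbf.getD g []
      = (pvGKeys L).filter (fun k => decide ((1 : Int) < (idx.getD k PySem.Dict.empty).getD g 0)) := by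
    intro g
    rw [hdbfdef, pv_dbf_outer, PySem.Dict.getD_empty, hitemsB]
    rw [List.flatMap_map]
    have hk : ∀ k, (((idx.getD k PySem.Dict.empty).items.filter
          (fun r => r.1 == g && decide ((1 : Int) < r.2))).map (fun _ : String × Int => k))
        = if decide ((1 : Int) < (idx.getD k PySem.Dict.empty).getD g 0) then [k] else [] := by
      intro k
      have hnd : (idx.getD k PySem.Dict.empty).keys.Nodup := by
        rw [hval_keys k]; exact pv_featsOf_nodup L k hPre'
      rw [PySem.Dict.items_eq_map_keys _ hnd 0, hval_keys k, List.filter_map, List.map_map]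
      simp only [Function.comp_def]
      rw [pv_filter_eq_nodup _ (pv_featsOf_nodup L k hPre') g
        (fun f => decide ((1 : Int) < (idx.getD k PySem.Dict.empty).getD f 0))]
      by_cases hc : (1 : Int) < (idx.getD k PySem.Dict.empty).getD g 0
      · rw [if_pos ⟨hmemfeats k g (lt_trans (by norm_num) hc), by simpa using hc⟩, if_pos (by simpa using hc)]
        rfl
      · rw [if_neg (fun h => hc (by simpa using h.2)), if_neg (by simpa using hc)]
        rfl
    simp only [hk]
    rw [pv_flatMap_if_filter]
    simp
  have hwithin : L.foldl pvA_withinStep []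
      = L.foldl (fun w p =>
          let dups := PySem.List.sorted (dbf.getD p.1 []) (fun x => x) false
          if dups.isEmpty then w else w ++ [(p.1, dups)]) [] := by
    apply PySem.List.foldl_congr_mem
    intro acc p hp
    have hdupsB : dbf.getD p.1 []
        = (pvGKeys L).filter (fun k => decide ((1 : Int) < (p.2.count k : Int))) := by
      rw [hdbf]
      apply List.filter_congr
      intro k _
      simp [hval_cnt k p hp]
    have hdupsA : pvA_dups p.2
        = (PySem.Set.ofList p.2).filter (fun k => decide ((1 : Int) < (p.2.count k : Int))) := by
      rw [pvA_dups, PySem.Dict.items_counter, List.filter_map, List.map_map]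
      show List.map (fun k => k) _ = _
      rw [List.map_id']
      rfl
    have hsorted : PySem.List.sorted (pvA_dups p.2) (fun x => x) false
        = PySem.List.sorted (dbf.getD p.1 []) (fun x => x) false := by
      rw [hdupsA, hdupsB]
      apply pv_sorted_eq_of_nodup_mem
      · exact List.Nodup.filter _ (PySem.Set.nodup_ofList p.2)
      · exact List.Nodup.filter _ hnodup
      · intro a
        simp only [List.mem_filter, PySem.Set.mem_ofList, decide_eq_true_eq]
        constructor
        · rintro ⟨_, hcnt⟩
          refine ⟨(hmemgk a).2 ⟨p, hp, ?_⟩, hcnt⟩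
          have hz : (0 : Int) < (p.2.count a : Int) := lt_trans (by norm_num) hcnt
          have : 0 < p.2.count a := by exact_mod_cast hz
          exact List.count_pos_iff.1 this
        · rintro ⟨_, hcnt⟩
          have hz : (0 : Int) < (p.2.count a : Int) := lt_trans (by norm_num) hcnt
          have : 0 < p.2.count a := by exact_mod_cast hz
          exact ⟨List.count_pos_iff.1 this, hcnt⟩
    have hempty : (pvA_dups p.2).isEmpty
        = (PySem.List.sorted (pvA_dups p.2) (fun x => x) false).isEmpty := by
      have hlen := (PySem.List.sorted_perm (pvA_dups p.2) (fun x => x) false).length_eq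
      apply Bool.eq_iff_iff.2
      simp only [List.isEmpty_iff_length_eq_zero]
      omega
    show pvA_withinStep acc p = _
    rw [pvA_withinStep, hempty, hsorted]
  exact congrArg₂ Prod.mk hwithin hacross
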